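-- pv_equiv track=rewrite | github.com/yudi-azvd/pspd | labs/02-brokers/client.py | divide_work
-- ===== SOURCE A (Python) =====
-- def divide_work(total_words: int, workers=1):
--     '''Maneira muito ingênua de dividir o trabalho entre a quantidade
--     de workers quase igualmente. A maior diferença é 1.'''
--     words_for_worker = [0 for _ in range(workers)]
--     i = 0
--     total_words_original = total_words
--     while total_words > 0:
--         words_for_worker[i % workers] += 1
--         total_words -= 1
--         i += 1
--     assert sum(words_for_worker) == total_words_original
--     return words_for_worker
-- ===== SOURCE B (Python) =====
-- def divide_work(total_words: int, workers=1):
--     '''Closed form: first total%workers workers get one extra word.'''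
--     base = total_words // workers
--     extra = total_words % workers
--     return [base + 1] * extra + [base] * (workers - extra)
-- ===== Notes on version B (the rewrite author's own statement) =====
-- stated objective: faster
-- what changed: Replaces the O(total_words) round-robin increment loop by the divmod closed form: the first total%workers workers get base+1 words, the rest base.
-- outside the precondition, e.g. on divide_work(0, 0): A returns [], B raises ZeroDivisionError
import Mathlib
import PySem

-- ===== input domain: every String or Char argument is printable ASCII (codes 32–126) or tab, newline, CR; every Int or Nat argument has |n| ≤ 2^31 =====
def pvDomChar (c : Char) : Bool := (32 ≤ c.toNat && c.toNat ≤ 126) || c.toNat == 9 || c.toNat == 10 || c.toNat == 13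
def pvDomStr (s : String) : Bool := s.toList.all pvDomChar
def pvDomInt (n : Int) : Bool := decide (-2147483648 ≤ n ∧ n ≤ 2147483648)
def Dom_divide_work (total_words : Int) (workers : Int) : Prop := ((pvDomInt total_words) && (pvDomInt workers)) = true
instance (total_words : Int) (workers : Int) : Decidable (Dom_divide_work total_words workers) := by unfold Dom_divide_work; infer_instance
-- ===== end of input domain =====

-- B replaces A's O(total_words) round-robin increment loop by the O(workers) divmod
-- closed form (first total%workers workers get base+1 words, the rest base).

-- ===== PORT A =====
-- the while loop: words_for_worker[i % workers] += 1; total_words -= 1; i += 1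
def divide_work_loop (lst : List Int) (total : Int) (i : Int) (workers : Int) : List Int :=
  if h : 0 < total then
    let j := (PySem.Int.mod i workers).toNat
    divide_work_loop (lst.set j (lst.getD j 0 + 1)) (total - 1) (i + 1) workers
  else lst
termination_by total.toNat
decreasing_by omega

def divide_work (total_words : Int) (workers : Int) : List Int :=
  -- [0 for _ in range(workers)] then the loop; the assert holds on Pre_ (else A raises)
  divide_work_loop (List.replicate workers.toNat 0) total_words 0 workers

-- ===== PORT B =====
def divide_work_alt (total_words : Int) (workers : Int) : List Int :=
  let base := PySem.Int.floordiv total_words workers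
  let extra := PySem.Int.mod total_words workers
  List.replicate extra.toNat (base + 1) ++ List.replicate (workers - extra).toNat base

-- ===== PRECONDITION & SPEC =====
-- Pre_ excludes: total_words < 0 (A's assert fails), workers ≤ 0 with total_words > 0
-- (A raises ZeroDivisionError/IndexError), and the degenerate (0, 0) on which A returns []
-- but B's division raises ZeroDivisionError.
def Pre_divide_work (total_words : Int) (workers : Int) : Prop :=
  0 ≤ total_words ∧ (0 < workers ∨ (total_words = 0 ∧ workers < 0))
instance (total_words : Int) (workers : Int) : Decidable (Pre_divide_work total_words workers) := by
  unfold Pre_divide_work; infer_instance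

def pvWitness_divide_work : Int × Int := (7, 3)

def Spec_divide_work (total_words : Int) (workers : Int) (out : List Int) : Prop :=
  out = divide_work_alt total_words workers
instance (total_words : Int) (workers : Int) (out : List Int) : Decidable (Spec_divide_work total_words workers out) := by
  unfold Spec_divide_work; infer_instance

-- ===== CLAIM (what is proved, stated in full; the proofs are below) =====
def Claim_equal_divide_work : Prop := ∀ (total_words : Int) (workers : Int), Dom_divide_work total_words workers → Pre_divide_work total_words workers → Spec_divide_work total_words workers (divide_work total_words workers)

-- ===== LEMMAS AND PROOFS =====

-- number of k < n with (i + k) % m = p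
def cntHits (n i p m : Nat) : Nat :=
  ((List.range n).filter (fun k => (i + k) % m = p)).length

lemma cntHits_succ_front (n i p m : Nat) :
    cntHits (n + 1) i p m = (if i % m = p then 1 else 0) + cntHits n (i + 1) p m := by
  unfold cntHits
  rw [List.range_succ_eq_map, List.filter_cons]
  have hfm : List.filter (fun k => decide ((i + k) % m = p)) (List.map Nat.succ (List.range n))
      = List.map Nat.succ (List.filter (fun k => decide ((i + 1 + k) % m = p)) (List.range n)) := by
    rw [List.filter_map]
    congr 1
    apply List.filter_congr
    intro k _
    have hk : i + Nat.succ k = i + 1 + k := by omega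
    simp [Function.comp, hk]
  simp only [Nat.add_zero, hfm]
  split_ifs <;> simp_all [Nat.add_comm]

lemma cntHits_succ_back (n p m : Nat) :
    cntHits (n + 1) 0 p m = cntHits n 0 p m + (if n % m = p then 1 else 0) := by
  unfold cntHits
  rw [List.range_succ, List.filter_append, List.length_append]
  by_cases h : n % m = p <;> simp [h]

lemma cntHits_closed (n p m : Nat) (hm : 0 < m) (hp : p < m) :
    cntHits n 0 p m = n / m + (if p < n % m then 1 else 0) := by
  induction n with
  | zero => simp [cntHits]
  | succ n ih =>
    rw [cntHits_succ_back, ih]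
    rcases Nat.lt_or_ge (n % m + 1) m with hlt | hge
    · have h2 : (n + 1) / m = n / m ∧ (n + 1) % m = n % m + 1 := by
        refine (Nat.div_mod_unique hm).mpr ⟨?_, hlt⟩
        have := Nat.div_add_mod n m; omega
      rw [h2.1, h2.2]
      split_ifs <;> omega
    · have heq : n % m + 1 = m := by have := Nat.mod_lt n hm; omega
      have h2 : (n + 1) / m = n / m + 1 ∧ (n + 1) % m = 0 := by
        refine (Nat.div_mod_unique hm).mpr ⟨?_, hm⟩
        have ha := Nat.div_add_mod n m
        have hb : m * (n / m + 1) = m * (n / m) + m := by ring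
        omega
      rw [h2.1, h2.2]
      split_ifs <;> omega

lemma loop_step (lst : List Int) (total i workers : Int) (h : 0 < total) :
    divide_work_loop lst total i workers
      = divide_work_loop
          (lst.set (PySem.Int.mod i workers).toNat
            (lst.getD (PySem.Int.mod i workers).toNat 0 + 1))
          (total - 1) (i + 1) workers := by
  rw [divide_work_loop]; simp [h]

lemma loop_stop (lst : List Int) (total i workers : Int) (h : ¬ 0 < total) :
    divide_work_loop lst total i workers = lst := by
  rw [divide_work_loop]; simp [h]

lemma divide_work_loop_length (n : Nat) (lst : List Int) (total i workers : Int)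
    (hn : total.toNat = n) :
    (divide_work_loop lst total i workers).length = lst.length := by
  induction n generalizing lst total i with
  | zero => rw [loop_stop _ _ _ _ (by omega)]
  | succ n ih =>
    rw [loop_step _ _ _ _ (by omega), ih _ _ _ (by omega)]
    simp

lemma pymod_int (i w : Int) (hi : 0 ≤ i) (hw : 0 < w) :
    PySem.Int.mod i w = ((i.toNat % w.toNat : Nat) : Int) := by
  rw [PySem.Int.mod_eq_emod_of_pos hw]
  have h1 : ((i.toNat : Nat) : Int) = i := Int.toNat_of_nonneg hi
  have h2 : ((w.toNat : Nat) : Int) = w := Int.toNat_of_nonneg (le_of_lt hw)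
  conv_lhs => rw [← h1, ← h2]
  rw [← Int.natCast_mod]

lemma pymod_toNat (i w : Int) (hi : 0 ≤ i) (hw : 0 < w) :
    (PySem.Int.mod i w).toNat = i.toNat % w.toNat := by
  rw [pymod_int i w hi hw, Int.toNat_natCast]

lemma divide_work_loop_getD (n : Nat) (lst : List Int) (total i workers : Int) (p : Nat)
    (hn : total.toNat = n) (hw : 0 < workers) (hi : 0 ≤ i) (hp : p < lst.length)
    (hlen : lst.length = workers.toNat) :
    (divide_work_loop lst total i workers).getD p 0
      = lst.getD p 0 + cntHits total.toNat i.toNat p workers.toNat := by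
  induction n generalizing lst total i with
  | zero =>
    rw [loop_stop _ _ _ _ (by omega), hn]
    simp [cntHits]
  | succ n ih =>
    rw [loop_step _ _ _ _ (by omega)]
    have hj : (PySem.Int.mod i workers).toNat = i.toNat % workers.toNat :=
      pymod_toNat i workers hi hw
    have hwn : 0 < workers.toNat := by omega
    have hjlt : (PySem.Int.mod i workers).toNat < lst.length := by
      rw [hj, hlen]; exact Nat.mod_lt _ hwn
    have hset : (lst.set (PySem.Int.mod i workers).toNat
        (lst.getD (PySem.Int.mod i workers).toNat 0 + 1)).length = lst.length := by simp
    rw [ih _ _ _ (by omega) (by omega) (by rw [hset]; exact hp) (by rw [hset]; exact hlen)]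
    have htn : total.toNat = (total - 1).toNat + 1 := by omega
    have hin : (i + 1).toNat = i.toNat + 1 := by omega
    rw [htn, hin, cntHits_succ_front]
    have hgetset : (lst.set (PySem.Int.mod i workers).toNat
          (lst.getD (PySem.Int.mod i workers).toNat 0 + 1)).getD p 0
        = lst.getD p 0 + (if i.toNat % workers.toNat = p then 1 else 0) := by
      by_cases hpj : (PySem.Int.mod i workers).toNat = p
      · subst hpj
        have hip : i.toNat % workers.toNat = (PySem.Int.mod i workers).toNat := hj.symm
        have hv : (lst.set (PySem.Int.mod i workers).toNat
              (lst.getD (PySem.Int.mod i workers).toNat 0 + 1)).getD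
              (PySem.Int.mod i workers).toNat 0
            = lst.getD (PySem.Int.mod i workers).toNat 0 + 1 := by
          rw [List.getD_eq_getElem _ _ (by rw [hset]; exact hjlt)]
          simp
        rw [hv]
        simp [hip]
      · have hip : i.toNat % workers.toNat ≠ p := by rw [← hj]; exact hpj
        have hv : (lst.set (PySem.Int.mod i workers).toNat
              (lst.getD (PySem.Int.mod i workers).toNat 0 + 1)).getD p 0
            = lst.getD p 0 := by
          rw [List.getD_eq_getElem _ _ (by rw [hset]; exact hp),
            List.getD_eq_getElem _ _ hp,
            List.getElem_set_ne (by simpa using hpj)]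
        rw [hv]
        simp [hip]
    rw [hgetset]
    push_cast
    ring

lemma replicate_append_getD (r s : Nat) (x y : Int) (p : Nat) (hp : p < r + s) :
    ((List.replicate r x ++ List.replicate s y).getD p 0) = if p < r then x else y := by
  by_cases h : p < r
  · rw [List.getD_eq_getElem _ _ (by simp; omega),
      List.getElem_append_left (by simpa using h)]
    simp [h]
  · rw [List.getD_eq_getElem _ _ (by simp; omega)]
    rw [List.getElem_append_right (by simpa using h)]
    simp [h]

-- ===== VERDICT (by name: the statement is the Claim_ definition above) =====
theorem divide_work_spec : Claim_equal_divide_work := by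
  intro t w _ hpre
  obtain ⟨ht, hw⟩ := hpre
  show divide_work t w = divide_work_alt t w
  have halt : divide_work_alt t w
      = List.replicate (PySem.Int.mod t w).toNat (PySem.Int.floordiv t w + 1)
        ++ List.replicate (w - PySem.Int.mod t w).toNat (PySem.Int.floordiv t w) := rfl
  rcases hw with hw | ⟨ht0, hwneg⟩
  · -- main case: 0 < workers
    have hwn : 0 < w.toNat := by omega
    have hmodI := pymod_int t w ht hw
    have hmod : (PySem.Int.mod t w).toNat = t.toNat % w.toNat := pymod_toNat t w ht hw
    have hdiv : PySem.Int.floordiv t w = ((t.toNat / w.toNat : Nat) : Int) := by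
      have h1 : t = ((t.toNat : Nat) : Int) := by omega
      have h2 : w = ((w.toNat : Nat) : Int) := by omega
      conv_lhs => rw [h1, h2]
      rw [PySem.Int.floordiv_natCast]
    have hmlt : t.toNat % w.toNat < w.toNat := Nat.mod_lt _ hwn
    unfold divide_work
    rw [halt]
    apply List.ext_getElem
    · rw [divide_work_loop_length t.toNat _ _ _ _ rfl]
      simp [hmod]
      omega
    · intro p hp1 hp2
      have hplt : p < w.toNat := by
        rw [divide_work_loop_length t.toNat _ _ _ _ rfl] at hp1; simpa using hp1
      rw [← List.getD_eq_getElem _ 0 hp1, ← List.getD_eq_getElem _ 0 hp2]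
      rw [divide_work_loop_getD t.toNat _ t 0 w p rfl hw le_rfl (by simpa using hplt) (by simp)]
      rw [show (0:Int).toNat = 0 from rfl]
      rw [cntHits_closed _ _ _ hwn hplt]
      rw [replicate_append_getD _ _ _ _ _ (by rw [hmod, hmodI]; omega)]
      simp only [hmod, hdiv]
      have hrep : (List.replicate w.toNat (0:Int)).getD p 0 = 0 := by
        rw [List.getD_eq_getElem _ _ (by simpa using hplt)]; simp
      rw [hrep]
      split_ifs <;> push_cast <;> omega
  · -- degenerate: total_words = 0, workers < 0: both return []
    subst ht0
    have hwt : w.toNat = 0 := by omega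
    have hm : PySem.Int.mod 0 w = 0 := by
      rw [PySem.Int.mod_eq_zero_iff_dvd]
      exact dvd_zero w
    unfold divide_work
    rw [loop_stop _ _ _ _ (by omega), halt, hm]
    simp [hwt]
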